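-- pv_equiv track=rewrite | github.com/heeluning/BrainPy | brainpy/tools/checking.py | check_shape
-- ===== SOURCE A (Python) =====
-- from typing import Union, Sequence, Dict, Callable, Tuple, Type
--
-- def check_shape(all_shapes, free_axes: Union[Sequence[int], int] = -1):
--   # check "all_shapes"
--   if isinstance(all_shapes, dict):
--     all_shapes = tuple(all_shapes.values())
--   elif isinstance(all_shapes, (tuple, list)):
--     all_shapes = tuple(all_shapes)
--   else:
--     raise ValueError
--   # maximum number of dimension
--   max_dim = max([len(shape) for shape in all_shapes])
--   all_shapes = [[1] * (max_dim - len(s)) + list(s) for s in all_shapes]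
--   # check "free_axes"
--   type_ = 'seq'
--   if isinstance(free_axes, int):
--     free_axes = (free_axes,)
--     type_ = 'int'
--   elif isinstance(free_axes, (tuple, list)):
--     free_axes = tuple(free_axes)
--   assert isinstance(free_axes, tuple)
--   free_axes = [(axis + max_dim if axis < 0 else axis) for axis in free_axes]
--   fixed_axes = [i for i in range(max_dim) if i not in free_axes]
--   # get all free shapes
--   if type_ == 'int':
--     free_shape = [shape[free_axes[0]] for shape in all_shapes]
--   else:
--     free_shape = [[shape[axis] for axis in free_axes] for shape in all_shapes]
--   # get all assumed fixed shapes
--   fixed_shapes = [[shape[axis] for shape in all_shapes] for axis in fixed_axes]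
--   max_fixed_shapes = [max(shape) for shape in fixed_shapes]
--   # check whether they can broadcast compatible
--   for i, shape in enumerate(fixed_shapes):
--     if len(set(shape) - {1, max_fixed_shapes[i]}):
--       raise ValueError(f'Shapes out of axes {free_axes} are not '
--                        f'broadcast compatible: \n'
--                        f'{all_shapes}')
--   return free_shape, max_fixed_shapes
-- ===== SOURCE B (Python) =====
-- def check_shape(all_shapes, free_axes=-1):
--   if isinstance(all_shapes, dict):
--     shapes = list(all_shapes.values())
--   elif isinstance(all_shapes, (tuple, list)):
--     shapes = list(all_shapes)
--   else:
--     raise ValueError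
--   max_dim = max(len(s) for s in shapes)
--
--   def dim(s, axis):
--     # dimension of shape `s` at `axis` after left-padding to max_dim with 1s,
--     # read on the fly (no padded copies are materialized)
--     pad = max_dim - len(s)
--     return 1 if axis < pad else s[axis - pad]
--
--   type_ = 'int' if isinstance(free_axes, int) else 'seq'
--   if type_ == 'int':
--     free_axes = (free_axes,)
--   free = [a + max_dim if a < 0 else a for a in free_axes]
--
--   if type_ == 'int':
--     free_shape = [dim(s, free[0]) for s in shapes]
--   else:
--     free_shape = [[dim(s, a) for a in free] for s in shapes]
--
--   # one pass per axis with a running broadcast dimension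
--   max_fixed_shapes = []
--   for axis in range(max_dim):
--     if axis in free:
--       continue
--     d = 1
--     for s in shapes:
--       v = dim(s, axis)
--       if v == 1 or v == d:
--         continue
--       if d == 1:
--         d = v
--       else:
--         raise ValueError(f'Shapes out of axes {free} are not '
--                          f'broadcast compatible: \n'
--                          f'{[[dim(s, i) for i in range(max_dim)] for s in shapes]}')
--     max_fixed_shapes.append(d)
--   return free_shape, max_fixed_shapes
-- ===== Notes on version B (the rewrite author's own statement) =====
-- stated objective: alternative
-- what changed: B drops A's materialized padded shape lists, transposed fixed-shapes table, per-axis max() and set-difference check, instead reading padded dimensions on the fly and resolving each fixed axis with a single running-broadcast fold (init 1, adopt the first non-1 value, conflict raises).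
-- intended difference: When free_axes < -max_dim (normalization leaves the axis negative) and some shape is not 1 at the axis Python then wraps to a second time, A returns that wrapped axis's entries as the free shape, while B returns 1 per shape (the padded dimension of a nonexistent leading axis), the intended broadcast reading of an axis left of all real ones. — e.g. on check_shape([[2]], -2): A returns ([2], [2]), B returns ([1], [2])
import Mathlib
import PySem

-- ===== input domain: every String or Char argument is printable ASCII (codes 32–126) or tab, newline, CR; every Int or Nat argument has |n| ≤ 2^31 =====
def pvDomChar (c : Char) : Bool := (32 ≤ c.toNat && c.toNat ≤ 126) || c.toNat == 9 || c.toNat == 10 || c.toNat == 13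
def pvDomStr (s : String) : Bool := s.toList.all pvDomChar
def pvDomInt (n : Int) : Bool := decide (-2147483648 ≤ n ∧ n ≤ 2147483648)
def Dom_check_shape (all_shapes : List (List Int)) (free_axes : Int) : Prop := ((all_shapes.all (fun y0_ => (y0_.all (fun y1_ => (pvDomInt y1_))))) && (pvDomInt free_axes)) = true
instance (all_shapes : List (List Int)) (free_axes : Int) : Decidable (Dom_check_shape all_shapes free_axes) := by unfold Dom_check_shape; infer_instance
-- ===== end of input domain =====

-- B replaces A's materialized padded shapes, transposed fixed-shape table, per-axis max and
-- set-difference check by on-the-fly padded indexing and one running-broadcast fold per axis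
-- (objective: alternative decomposition, same asymptotic cost).

-- ===== PORT A =====
-- port of A (the `isinstance(all_shapes, list)` branch and `free_axes : int`, per the Lean signature);
-- Python raises on empty `all_shapes` (ValueError from taking the max of no lengths), on an out-of-range free axis (IndexError) and on
-- broadcast-incompatible shapes (ValueError): Pre_check_shape excludes exactly those inputs, the
-- port returns the `.getD 0` default there.
def check_shape (all_shapes : List (List Int)) (free_axes : Int) : List Int × List Int :=
  -- max_dim = max([len(shape) for shape in all_shapes])
  let max_dim : Int := (PySem.List.max? (all_shapes.map (fun s => (s.length : Int))) (fun y => y)).getD 0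
  -- all_shapes = [[1] * (max_dim - len(s)) + list(s) for s in all_shapes]
  let padded : List (List Int) := all_shapes.map (fun s => List.replicate (max_dim - (s.length : Int)).toNat 1 ++ s)
  -- free_axes = (free_axes,); free_axes = [(axis + max_dim if axis < 0 else axis) for axis in free_axes]
  let fa : Int := if free_axes < 0 then free_axes + max_dim else free_axes
  let free_axes_l : List Int := [fa]
  -- fixed_axes = [i for i in range(max_dim) if i not in free_axes]
  let fixed_axes : List Int := (PySem.List.pyRange 0 max_dim 1).filter (fun i => !(free_axes_l.contains i))
  -- free_shape = [shape[free_axes[0]] for shape in all_shapes]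
  let free_shape : List Int := padded.map (fun s => (PySem.List.pyGet? s fa).getD 0)
  -- fixed_shapes = [[shape[axis] for shape in all_shapes] for axis in fixed_axes]
  let fixed_shapes : List (List Int) := fixed_axes.map (fun ax => padded.map (fun s => (PySem.List.pyGet? s ax).getD 0))
  -- max_fixed_shapes = [max(shape) for shape in fixed_shapes]
  let max_fixed_shapes : List Int := fixed_shapes.map (fun sh => (PySem.List.max? sh (fun y => y)).getD 0)
  -- the final for-loop only raises ValueError on incompatible shapes (excluded by Pre_); it computes nothing
  (free_shape, max_fixed_shapes)

-- ===== PORT B =====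
-- dimension of shape `s` at `axis` after left-padding to `M` with 1s (Source B's inner `dim`;
-- the out-of-range IndexError of `s[axis - pad]` becomes the `.getD 0` default, excluded by Pre_)
def pvDim (M : Int) (s : List Int) (axis : Int) : Int :=
  if axis < M - (s.length : Int) then 1
  else (PySem.List.pyGet? s (axis - (M - (s.length : Int)))).getD 0

-- Source B's running broadcast step: ignore 1s, adopt the first non-1 value, keep it
-- (on a conflicting non-1 value Python raises ValueError — excluded by Pre_ — so the port keeps d)
def pvStep (d v : Int) : Int :=
  if v == 1 || v == d then d
  else if d == 1 then v
  else d

def check_shape_alt (all_shapes : List (List Int)) (free_axes : Int) : List Int × List Int :=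
  -- max_dim = max(len(s) for s in shapes)
  let max_dim : Int := (PySem.List.max? (all_shapes.map (fun s => (s.length : Int))) (fun y => y)).getD 0
  -- free = [a + max_dim if a < 0 else a for a in free_axes]  (int case: a single axis)
  let fa : Int := if free_axes < 0 then free_axes + max_dim else free_axes
  let free : List Int := [fa]
  -- free_shape = [dim(s, free[0]) for s in shapes]   (free[0] on this one-element list = headD)
  let free_shape : List Int := all_shapes.map (fun s => pvDim max_dim s (free.headD 0))
  -- for axis in range(max_dim): if axis in free: continue; fold the running dim over the shapes
  let max_fixed_shapes : List Int :=
    (PySem.List.pyRange 0 max_dim 1).foldl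
      (fun acc axis =>
        if free.contains axis then acc
        else acc ++ [all_shapes.foldl (fun d s => pvStep d (pvDim max_dim s axis)) 1]) []
  (free_shape, max_fixed_shapes)

-- ===== PRECONDITION & SPEC =====
-- spec-side reading of shape `s` at `axis` after conceptual left-padding to rank `M` with 1s:
-- the element counted from the right when the axis reaches into `s`, and 1 otherwise
def pvSpecDim (M : Int) (s : List Int) (axis : Int) : Int :=
  if 0 ≤ axis ∧ axis < M ∧ M - axis ≤ (s.length : Int) then s.getD (s.length - (M - axis).toNat) 1
  else 1

-- the largest rank among the shapes (0 for no shapes), used only to state Pre_/D_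
def pvMaxDim (all_shapes : List (List Int)) : Int :=
  (((all_shapes.map List.length).foldl max 0 : Nat) : Int)

-- Pre_ excludes exactly the inputs where the Python A raises: empty `all_shapes` (ValueError from
-- taking the max of no lengths), a free axis whose (possibly once-shifted) index is out of range for the padded shapes
-- (IndexError), and shapes whose dimensions on a checked axis are not all 1-or-the-axis-maximum
-- (A's broadcast ValueError).
def Pre_check_shape (all_shapes : List (List Int)) (free_axes : Int) : Prop :=
  all_shapes ≠ [] ∧
  -2 * pvMaxDim all_shapes ≤ free_axes ∧ free_axes < pvMaxDim all_shapes ∧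
  (∀ i ∈ PySem.List.pyRange 0 (pvMaxDim all_shapes) 1,
    i ≠ (if free_axes < 0 then free_axes + pvMaxDim all_shapes else free_axes) →
    ∀ s ∈ all_shapes,
      pvSpecDim (pvMaxDim all_shapes) s i = 1 ∨
      ∀ t ∈ all_shapes, pvSpecDim (pvMaxDim all_shapes) t i ≤ pvSpecDim (pvMaxDim all_shapes) s i)
instance (all_shapes : List (List Int)) (free_axes : Int) : Decidable (Pre_check_shape all_shapes free_axes) := by
  unfold Pre_check_shape; infer_instance

def pvWitness_check_shape : List (List Int) × Int := ([[2, 1], [3]], 0)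

-- When free_axes < -max_dim (normalization leaves it negative) and some shape is not 1 at the
-- axis Python's negative indexing then silently wraps to, A returns that wrapped axis's entries
-- as the free shape, while B returns 1 (the padded dimension of a nonexistent leading axis),
-- which is the intended broadcast reading of an axis left of all real ones.
def D_check_shape (all_shapes : List (List Int)) (free_axes : Int) : Prop :=
  all_shapes ≠ [] ∧ free_axes < -(pvMaxDim all_shapes) ∧
  ∃ s ∈ all_shapes, pvSpecDim (pvMaxDim all_shapes) s (2 * pvMaxDim all_shapes + free_axes) ≠ 1
instance (all_shapes : List (List Int)) (free_axes : Int) : Decidable (D_check_shape all_shapes free_axes) := by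
  unfold D_check_shape; infer_instance

def Spec_check_shape (all_shapes : List (List Int)) (free_axes : Int) (out : List Int × List Int) : Prop :=
  ¬ D_check_shape all_shapes free_axes → out = check_shape_alt all_shapes free_axes
instance (all_shapes : List (List Int)) (free_axes : Int) (out : List Int × List Int) : Decidable (Spec_check_shape all_shapes free_axes out) := by
  unfold Spec_check_shape; infer_instance

def pvDiffWitness_check_shape : List (List Int) × Int := ([[2]], -2)
def pvDiffWitnessOut_check_shape : (List Int × List Int) × (List Int × List Int) := (([2], [2]), ([1], [2]))

-- ===== CLAIM (what is proved, stated in full; the proofs are below) =====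
def Claim_unchanged_check_shape : Prop := ∀ (all_shapes : List (List Int)) (free_axes : Int), Dom_check_shape all_shapes free_axes → Pre_check_shape all_shapes free_axes → Spec_check_shape all_shapes free_axes (check_shape all_shapes free_axes)
def Claim_changed_check_shape : Prop := Dom_check_shape (pvDiffWitness_check_shape.1) (pvDiffWitness_check_shape.2) ∧ Pre_check_shape (pvDiffWitness_check_shape.1) (pvDiffWitness_check_shape.2) ∧ D_check_shape (pvDiffWitness_check_shape.1) (pvDiffWitness_check_shape.2) ∧ check_shape (pvDiffWitness_check_shape.1) (pvDiffWitness_check_shape.2) = pvDiffWitnessOut_check_shape.1 ∧ check_shape_alt (pvDiffWitness_check_shape.1) (pvDiffWitness_check_shape.2) = pvDiffWitnessOut_check_shape.2 ∧ pvDiffWitnessOut_check_shape.1 ≠ pvDiffWitnessOut_check_shape.2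
def Claim_exact_check_shape : Prop := ∀ (all_shapes : List (List Int)) (free_axes : Int), Dom_check_shape all_shapes free_axes → Pre_check_shape all_shapes free_axes → D_check_shape all_shapes free_axes → check_shape all_shapes free_axes ≠ check_shape_alt all_shapes free_axes

-- ===== LEMMAS AND PROOFS =====

theorem cast_foldl_max (l : List Nat) (n : Nat) :
    ((l.foldl max n : Nat) : Int) = List.foldl max (n : Int) (l.map (Nat.cast : Nat → Int)) := by
  induction l generalizing n with
  | nil => rfl
  | cons x t ih =>
    simp only [List.foldl_cons, List.map_cons, ih, Nat.cast_max]

theorem pvDim_of_neg (M : Int) (s : List Int) (hs : (s.length : Int) ≤ M) (i : Int) (hi : i < 0) :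
    pvDim M s i = 1 := by
  unfold pvDim
  rw [if_pos (by omega)]

theorem pvSpecDim_eq (M : Int) (s : List Int) (hs : (s.length : Int) ≤ M) (axis : Int)
    (ha : axis < M) : pvSpecDim M s axis = pvDim M s axis := by
  unfold pvSpecDim pvDim
  by_cases h0 : 0 ≤ axis
  · by_cases h1 : M - axis ≤ (s.length : Int)
    · rw [if_pos ⟨h0, ha, h1⟩, if_neg (by omega)]
      rw [PySem.List.pyGet?_of_nonneg s (by omega)]
      rw [List.getD_eq_getElem?_getD]
      have hk : (axis - (M - (s.length : Int))).toNat = s.length - (M - axis).toNat := by omega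
      rw [hk, List.getElem?_eq_getElem (by omega)]
      simp
    · rw [if_neg (by tauto), if_pos (by omega)]
  · rw [if_neg (by tauto), if_pos (by omega)]

theorem pad_elem (M : Int) (s : List Int) (hs : (s.length : Int) ≤ M) (j : Nat) (hj : (j : Int) < M) :
    (List.replicate (M - (s.length : Int)).toNat 1 ++ s)[j]? = some (pvDim M s (j : Int)) := by
  unfold pvDim
  by_cases h : (j : Int) < M - (s.length : Int)
  · rw [if_pos h, List.getElem?_append_left (by simp; omega)]
    rw [List.getElem?_replicate, if_pos (by omega)]
  · rw [if_neg h, List.getElem?_append_right (by simp; omega)]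
    rw [PySem.List.pyGet?_of_nonneg s (by omega)]
    have hk : ((j : Int) - (M - (s.length : Int))).toNat = j - ((List.replicate (M - (s.length : Int)).toNat 1).length) := by
      simp
      omega
    rw [hk]
    rw [List.getElem?_eq_getElem (by simp; omega)]
    rw [List.getElem?_eq_getElem (by simp; omega)]
    simp

theorem pad_get_nonneg (M : Int) (s : List Int) (hs : (s.length : Int) ≤ M) (i : Int)
    (h0 : 0 ≤ i) (hi : i < M) :
    (PySem.List.pyGet? (List.replicate (M - (s.length : Int)).toNat 1 ++ s) i).getD 0 = pvDim M s i := by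
  rw [PySem.List.pyGet?_of_nonneg _ h0, pad_elem M s hs i.toNat (by omega)]
  simp [Int.toNat_of_nonneg h0]

theorem pad_get_neg (M : Int) (s : List Int) (hs : (s.length : Int) ≤ M) (i : Int)
    (hneg : -M ≤ i) (hi : i < 0) :
    (PySem.List.pyGet? (List.replicate (M - (s.length : Int)).toNat 1 ++ s) i).getD 0 = pvDim M s (i + M) := by
  have hk : i = -(((-i).toNat : Int)) := by omega
  have hlen : (List.replicate (M - (s.length : Int)).toNat 1 ++ s).length = M.toNat := by
    simp; omega
  rw [hk, PySem.List.pyGet?_neg_natCast _ _ (by omega) (by omega)]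
  rw [hlen]
  have hje : M.toNat - (-i).toNat = (i + M).toNat := by omega
  rw [hje, pad_elem M s hs _ (by omega)]
  simp
  congr 1
  omega

theorem fold_step_keep (m : Int) (vs : List Int) (h : ∀ v ∈ vs, v = 1 ∨ v = m) :
    vs.foldl pvStep m = m := by
  induction vs with
  | nil => rfl
  | cons v t ih =>
    rcases h v (by simp) with h1 | h1 <;>
    · subst h1
      simp only [List.foldl_cons, pvStep]
      simp only [beq_self_eq_true, Bool.or_true, Bool.true_or, if_pos]
      exact ih (fun w hw => h w (by simp [hw]))

theorem fold_step_from_one (m : Int) (hm : m ≠ 1) (vs : List Int)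
    (h : ∀ v ∈ vs, v = 1 ∨ v = m) (hmem : m ∈ vs) : vs.foldl pvStep 1 = m := by
  induction vs with
  | nil => simp at hmem
  | cons v t ih =>
    rcases h v (by simp) with h1 | h1
    · subst h1
      have hmt : m ∈ t := by
        rcases List.mem_cons.mp hmem with h2 | h2
        · omega
        · exact h2
      simp only [List.foldl_cons, pvStep, beq_self_eq_true, Bool.true_or, if_pos]
      exact ih (fun w hw => h w (by simp [hw])) hmt
    · subst h1
      simp only [List.foldl_cons, pvStep]
      rw [if_neg (by simp [hm]), if_pos (by simp)]
      exact fold_step_keep v t (fun w hw => h w (by simp [hw]))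

theorem max_eq_fold (vs : List Int) (hne : vs ≠ [])
    (h : ∀ v ∈ vs, v = 1 ∨ ∀ w ∈ vs, w ≤ v) :
    (PySem.List.max? vs (fun y => y)).getD 0 = vs.foldl pvStep 1 := by
  obtain ⟨v, t, rfl⟩ := List.exists_cons_of_ne_nil hne
  rw [PySem.List.max?_id_cons]
  by_cases hall : ∀ w ∈ v :: t, w = 1
  · have hv : v = 1 := hall v (by simp)
    have hfm : t.foldl max v = 1 := by
      rcases PySem.List.foldl_max_mem t v with h1 | h1
      · rw [h1, hv]
      · exact hall _ (by simp [h1])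
    have hfs : (v :: t).foldl pvStep 1 = 1 := by
      subst hv
      exact fold_step_keep 1 (1 :: t) (fun w hw => by
        rcases List.mem_cons.mp hw with h2 | h2
        · exact Or.inl h2
        · exact Or.inl (hall w (by simp [h2])))
    simp [hfm, hfs]
  · push Not at hall
    obtain ⟨m, hmem, hm1⟩ := hall
    have hmax : ∀ w ∈ v :: t, w ≤ m := by
      rcases h m hmem with h1 | h1
      · omega
      · exact h1
    have hub : ∀ w ∈ v :: t, w = 1 ∨ w = m := by
      intro w hw
      rcases h w hw with h1 | h1
      · exact Or.inl h1
      · exact Or.inr (le_antisymm (hmax w hw) (h1 m hmem))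
    have hfm : t.foldl max v = m := by
      apply le_antisymm
      · rcases PySem.List.foldl_max_mem t v with h1 | h1
        · rw [h1]; exact hmax v (by simp)
        · exact hmax _ (by simp [h1])
      · rcases List.mem_cons.mp hmem with h2 | h2
        · subst h2; exact (PySem.List.le_foldl_max t m).1
        · exact (PySem.List.le_foldl_max t v).2 m h2
    rw [hfm, fold_step_from_one m hm1 (v :: t) hub hmem]
    rfl

theorem foldl_skip {α β : Type} (p : α → Bool) (f : α → β) (l : List α) (acc : List β) :
    l.foldl (fun acc x => if p x then acc else acc ++ [f x]) acc
      = acc ++ (l.filter (fun x => !p x)).map f := by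
  induction l generalizing acc with
  | nil => simp
  | cons x t ih =>
    by_cases hp : p x = true
    · simp [hp, ih]
    · simp only [Bool.not_eq_true] at hp
      simp [hp, ih]

theorem main_unchanged : ∀ (all_shapes : List (List Int)) (free_axes : Int), Pre_check_shape all_shapes free_axes → ¬ D_check_shape all_shapes free_axes → check_shape all_shapes free_axes = check_shape_alt all_shapes free_axes := by
  intro a f hpre hnd
  obtain ⟨hne, hlo, hhi, hbc⟩ := hpre
  obtain ⟨m, hm⟩ : ∃ m, PySem.List.max? (a.map (fun s => (s.length : Int))) (fun y => y) = some m := by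
    cases hq : PySem.List.max? (a.map (fun s => (s.length : Int))) (fun y => y) with
    | none => exact absurd (by simpa using (PySem.List.max?_eq_none_iff _ _).mp hq) hne
    | some m => exact ⟨m, rfl⟩
  have hMv : pvMaxDim a = m := by
    obtain ⟨s, t, rfl⟩ := List.exists_cons_of_ne_nil hne
    simp only [List.map_cons, PySem.List.max?_id_cons, Option.some.injEq] at hm
    unfold pvMaxDim
    simp only [List.map_cons, List.foldl_cons, Nat.zero_max]
    rw [cast_foldl_max, List.map_map]
    exact hm
  have hub : ∀ s ∈ a, (s.length : Int) ≤ m := by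
    intro s hs
    exact PySem.List.max?_isMax hm _ (List.mem_map_of_mem hs)
  have hM0 : 0 ≤ m := by
    obtain ⟨s, _, hsm⟩ := List.mem_map.mp (PySem.List.max?_mem hm)
    omega
  rw [hMv] at hlo hhi hbc
  simp only [check_shape, check_shape_alt, hm, Option.getD_some, List.map_map, List.headD_cons]
  rw [foldl_skip]
  simp only [List.nil_append, Prod.mk.injEq]
  constructor
  · -- free shapes
    apply List.map_congr_left
    intro s hs
    simp only [Function.comp]
    by_cases hf : f < 0
    · rw [if_pos hf]
      by_cases hf2 : f < -m
      · -- doubly negative: ¬D gives all wrapped dims 1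
        have hall : ∀ s ∈ a, pvSpecDim (pvMaxDim a) s (2 * pvMaxDim a + f) = 1 := by
          by_contra hc
          push Not at hc
          obtain ⟨t, ht, htn⟩ := hc
          exact hnd ⟨hne, by rw [hMv]; omega, t, ht, htn⟩
        rw [hMv] at hall
        rw [pad_get_neg m s (hub s hs) (f + m) (by omega) (by omega)]
        have h1 : f + m + m = 2 * m + f := by ring
        rw [h1, ← pvSpecDim_eq m s (hub s hs) (2 * m + f) (by omega),
          hall s hs, pvDim_of_neg m s (hub s hs) (f + m) (by omega)]
      · rw [pad_get_nonneg m s (hub s hs) (f + m) (by omega) (by omega)]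
    · rw [if_neg hf]
      rw [pad_get_nonneg m s (hub s hs) f (by omega) (by omega)]
  · -- fixed shapes
    apply List.map_congr_left
    intro ax hax
    obtain ⟨haxr, haxc⟩ := List.mem_filter.mp hax
    have hax1 : 0 ≤ ax ∧ ax < m := (PySem.List.mem_pyRange_one).mp haxr
    have haxne : ax ≠ (if f < 0 then f + m else f) := by
      simpa using haxc
    simp only [Function.comp]
    have hmapeq : a.map ((fun s => (PySem.List.pyGet? s ax).getD 0) ∘ fun s => List.replicate (m - (s.length : Int)).toNat 1 ++ s)
        = a.map (fun s => pvDim m s ax) := by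
      apply List.map_congr_left
      intro s hs
      exact pad_get_nonneg m s (hub s hs) ax hax1.1 hax1.2
    rw [hmapeq, ← List.foldl_map]
    apply max_eq_fold
    · simpa using hne
    · intro v hv
      obtain ⟨s, hs, rfl⟩ := List.mem_map.mp hv
      have hb := hbc ax haxr haxne s hs
      rw [pvSpecDim_eq m s (hub s hs) ax hax1.2] at hb
      rcases hb with h1 | h1
      · exact Or.inl h1
      · refine Or.inr ?_
        intro w hw
        obtain ⟨t, ht, rfl⟩ := List.mem_map.mp hw
        have := h1 t ht
        rw [pvSpecDim_eq m t (hub t ht) ax hax1.2] at this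
        exact this

theorem main_exact : ∀ (all_shapes : List (List Int)) (free_axes : Int), Pre_check_shape all_shapes free_axes → D_check_shape all_shapes free_axes → check_shape all_shapes free_axes ≠ check_shape_alt all_shapes free_axes := by
  intro a f hpre hd heq
  obtain ⟨hne, hlo, hhi, _⟩ := hpre
  obtain ⟨_, hfneg, s0, hs0, hs0n⟩ := hd
  obtain ⟨m, hm⟩ : ∃ m, PySem.List.max? (a.map (fun s => (s.length : Int))) (fun y => y) = some m := by
    cases hq : PySem.List.max? (a.map (fun s => (s.length : Int))) (fun y => y) with
    | none => exact absurd (by simpa using (PySem.List.max?_eq_none_iff _ _).mp hq) hne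
    | some m => exact ⟨m, rfl⟩
  have hMv : pvMaxDim a = m := by
    obtain ⟨s, t, rfl⟩ := List.exists_cons_of_ne_nil hne
    simp only [List.map_cons, PySem.List.max?_id_cons, Option.some.injEq] at hm
    unfold pvMaxDim
    simp only [List.map_cons, List.foldl_cons, Nat.zero_max]
    rw [cast_foldl_max, List.map_map]
    exact hm
  have hub : ∀ s ∈ a, (s.length : Int) ≤ m := by
    intro s hs
    exact PySem.List.max?_isMax hm _ (List.mem_map_of_mem hs)
  have hM0 : 0 ≤ m := by
    obtain ⟨s, _, hsm⟩ := List.mem_map.mp (PySem.List.max?_mem hm)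
    omega
  rw [hMv] at hlo hhi hfneg hs0n
  have h1 : (check_shape a f).1 = (check_shape_alt a f).1 := by rw [heq]
  simp only [check_shape, check_shape_alt, hm, Option.getD_some, List.map_map, List.headD_cons] at h1
  rw [if_pos (by omega : f < 0)] at h1
  have h2 := (List.map_eq_map_iff.mp h1) s0 hs0
  simp only [Function.comp] at h2
  rw [pad_get_neg m s0 (hub s0 hs0) (f + m) (by omega) (by omega)] at h2
  have h3 : f + m + m = 2 * m + f := by ring
  rw [h3, pvDim_of_neg m s0 (hub s0 hs0) (f + m) (by omega),
    ← pvSpecDim_eq m s0 (hub s0 hs0) (2 * m + f) (by omega)] at h2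
  exact hs0n h2

-- ===== VERDICT (by name: the statement is the Claim_ definition above) =====
theorem check_shape_spec : Claim_unchanged_check_shape := by
  intro a f _ hpre hnd
  exact main_unchanged a f hpre hnd

theorem check_shape_changed : Claim_changed_check_shape := by
  unfold Claim_changed_check_shape; decide

theorem check_shape_tight : Claim_exact_check_shape := by
  intro a f _ hpre hd
  exact main_exact a f hpre hd
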